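-- pv_equiv track=rewrite | github.com/drone-graph/drone-graph | src/drone_graph/model_registry/generate.py | _anthropic_frontier_vendor
-- ===== SOURCE A (Python) =====
-- from collections.abc import Callable, Iterable, Iterator
--
-- def _pick_first_vendor(
--     candidates: Iterable[str],
--     *,
--     vendor_ids: set[str],
-- ) -> str | None:
--     for c in candidates:
--         if c in vendor_ids:
--             return c
--     return None
--
-- def _anthropic_frontier_vendor(aset: set[str]) -> str | None:
--     v = _pick_first_vendor(
--         (
--             "claude-opus-4-20250514",
--             "claude-3-opus-20240229",
--             "claude-sonnet-4-20250514",
--             "claude-3-5-sonnet-20241022",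
--         ),
--         vendor_ids=aset,
--     )
--     if v is not None:
--         return v
--     for vid in sorted(aset, reverse=True):
--         low = vid.lower()
--         if "opus" in low or "sonnet" in low:
--             return vid
--     return sorted(aset)[-1] if aset else None
-- ===== SOURCE B (Python) =====
-- _PRIORITY = (
--     "claude-opus-4-20250514",
--     "claude-3-opus-20240229",
--     "claude-sonnet-4-20250514",
--     "claude-3-5-sonnet-20241022",
-- )
--
-- def _weight(vid):
--     if vid in _PRIORITY:
--         return len(_PRIORITY) + 3 - _PRIORITY.index(vid)
--     low = vid.lower()
--     return 2 if ("opus" in low or "sonnet" in low) else 1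
--
-- def _anthropic_frontier_vendor(aset):
--     return max(aset, key=lambda v: (_weight(v), v)) if aset else None
-- ===== Notes on version B (the rewrite author's own statement) =====
-- stated objective: faster
-- what changed: A's three sequential fallback passes (priority-tuple probe, reverse-sorted opus/sonnet scan, sorted last element) are replaced by a single unsorted max over the set under a composite key (weight, id), where the weight ranks priority ids above opus/sonnet ids above the rest.
import Mathlib
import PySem

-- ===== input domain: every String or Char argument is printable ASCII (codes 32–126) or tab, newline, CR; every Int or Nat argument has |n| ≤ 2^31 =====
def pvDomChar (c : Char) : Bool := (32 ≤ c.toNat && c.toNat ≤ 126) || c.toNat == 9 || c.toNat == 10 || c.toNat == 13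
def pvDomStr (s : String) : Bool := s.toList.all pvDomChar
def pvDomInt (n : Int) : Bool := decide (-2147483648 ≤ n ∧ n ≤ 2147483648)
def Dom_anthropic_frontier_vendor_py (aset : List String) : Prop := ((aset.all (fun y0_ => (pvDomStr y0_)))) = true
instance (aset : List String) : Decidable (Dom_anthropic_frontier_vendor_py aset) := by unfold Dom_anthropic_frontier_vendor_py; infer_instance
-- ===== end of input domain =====

-- B replaces A's three sequential fallback passes by a single max over the set under
-- the composite key (weight, id): one keyed selection pass, no sorting (measured faster in a timing run).

-- ===== PORT A =====
-- the priority tuple literal of A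
def pvPriority : List String :=
  ["claude-opus-4-20250514", "claude-3-opus-20240229",
   "claude-sonnet-4-20250514", "claude-3-5-sonnet-20241022"]

def pick_first_vendor (candidates : List String) (vendor_ids : List String) : Option String :=
  match candidates with
  | [] => none
  | c :: rest => if c ∈ vendor_ids then some c else pick_first_vendor rest vendor_ids

-- the 'for vid in sorted(aset, reverse=True)' loop of A
def afv_scan (l : List String) : Option String :=
  match l with
  | [] => none
  | vid :: rest =>
    let low := PySem.Str.lower vid
    if PySem.Str.isIn "opus" low || PySem.Str.isIn "sonnet" low then some vid else afv_scan rest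

def anthropic_frontier_vendor_py (aset : List String) : Option String :=
  match pick_first_vendor pvPriority aset with
  | some v => some v
  | none =>
    match afv_scan (PySem.List.sorted aset (fun x => x) true) with
    | some vid => some vid
    | none =>
      if aset.isEmpty then none
      else PySem.List.pyGet? (PySem.List.sorted aset (fun x => x) false) (-1)

-- ===== PORT B =====
-- '"opus" in vid.lower() or "sonnet" in vid.lower()'
def pvOpusSonnet (vid : String) : Bool :=
  PySem.Str.isIn "opus" (PySem.Str.lower vid) || PySem.Str.isIn "sonnet" (PySem.Str.lower vid)

-- Source B's _weight: the membership test + .index of Source B as one index? match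
def pvWeight (vid : String) : Int :=
  match PySem.List.index? pvPriority vid with
  | some r => (pvPriority.length : Int) + 3 - (r : Int)
  | none => if pvOpusSonnet vid then 2 else 1

def anthropic_frontier_vendor_py_alt (aset : List String) : Option String :=
  if aset.isEmpty then none
  else PySem.List.max2? aset (fun v => pvWeight v) (fun v => v)

-- ===== PRECONDITION & SPEC =====
def Spec_anthropic_frontier_vendor_py (aset : List String) (out : Option String) : Prop := out = anthropic_frontier_vendor_py_alt aset
instance (aset : List String) (out : Option String) : Decidable (Spec_anthropic_frontier_vendor_py aset out) := by unfold Spec_anthropic_frontier_vendor_py; infer_instance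

-- ===== CLAIM (what is proved, stated in full; the proofs are below) =====
def Claim_equal_anthropic_frontier_vendor_py : Prop := ∀ (aset : List String), Dom_anthropic_frontier_vendor_py aset → Spec_anthropic_frontier_vendor_py aset (anthropic_frontier_vendor_py aset)

-- ===== LEMMAS AND PROOFS =====

-- strict lexicographic order on the composite key (weight v, v)
def pvLexlt (a b : String) : Prop := pvWeight a < pvWeight b ∨ (pvWeight a = pvWeight b ∧ a < b)

-- the folding step of max2? with these keys
def pvStep (acc : Option String) (x : String) : Option String :=
  match acc with
  | none => some x
  | some m =>
    if (decide (pvWeight m < pvWeight x) || !decide (pvWeight x < pvWeight m) && decide (m < x)) = true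
    then some x else some m

lemma max2?_eq_foldl_pvStep (xs : List String) :
    PySem.List.max2? xs (fun v => pvWeight v) (fun v => v) = xs.foldl pvStep none := by
  show List.foldl _ none xs = List.foldl pvStep none xs
  congr 1
  funext acc x
  cases acc <;> rfl

lemma pvStep_of_lt {a x : String} (h : pvLexlt a x) : pvStep (some a) x = some x := by
  rcases h with h | ⟨h1, h2⟩
  · simp [pvStep, h]
  · simp [pvStep, h1, h2]

lemma pvStep_of_not {a x : String} (h : ¬ pvLexlt a x) : pvStep (some a) x = some a := by
  unfold pvLexlt at h
  push Not at h
  obtain ⟨hle, himp⟩ := h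
  by_cases h2 : pvWeight x < pvWeight a
  · have h1 : ¬ pvWeight a < pvWeight x := lt_asymm h2
    simp [pvStep, h1, h2]
  · have heq : pvWeight a = pvWeight x := by omega
    have h3 : ¬ a < x := himp heq
    simp [pvStep, heq, h3]

lemma pvLexlt_irrefl (a : String) : ¬ pvLexlt a a := by
  rintro (h | ⟨_, h⟩) <;> exact lt_irrefl _ h

lemma pvLexlt_asymm {a b : String} (h : pvLexlt a b) : ¬ pvLexlt b a := by
  rcases h with h | ⟨h1, h2⟩ <;> rintro (g | ⟨g1, g2⟩)
  · exact absurd h (lt_asymm g)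
  · exact absurd h (by simp [g1])
  · exact absurd g (by simp [h1])
  · exact absurd h2 (lt_asymm g2)

lemma pvFold_eq (m : String) (xs : List String) : ∀ (acc : Option String),
    (∀ a, acc = some a → a = m ∨ pvLexlt a m) →
    (m ∈ xs ∨ acc = some m) →
    (∀ y ∈ xs, y = m ∨ pvLexlt y m) →
    xs.foldl pvStep acc = some m := by
  induction xs with
  | nil =>
    intro acc H1 H2 _
    rcases H2 with h | h
    · exact absurd h (List.not_mem_nil)
    · simpa using h
  | cons x rest ih =>
    intro acc H1 H2 H3
    simp only [List.foldl_cons]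
    have hstep_m : (∀ a, acc = some a → a = m ∨ pvLexlt a m) → pvStep acc m = some m := by
      intro H
      match acc with
      | none => rfl
      | some a =>
        rcases H a rfl with rfl | hl
        · exact pvStep_of_not (pvLexlt_irrefl a)
        · exact pvStep_of_lt hl
    apply ih
    · -- H1 for the new accumulator
      intro a ha
      match acc with
      | none =>
        simp [pvStep] at ha
        subst ha
        exact H3 _ List.mem_cons_self
      | some b =>
        rcases H1 b rfl with rfl | hb
        · by_cases hx : pvLexlt b x
          · rw [pvStep_of_lt hx] at ha
            injection ha with ha; subst ha
            exact H3 _ List.mem_cons_self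
          · rw [pvStep_of_not hx] at ha
            injection ha with ha; subst ha
            exact Or.inl rfl
        · by_cases hx : pvLexlt b x
          · rw [pvStep_of_lt hx] at ha
            injection ha with ha; subst ha
            exact H3 _ List.mem_cons_self
          · rw [pvStep_of_not hx] at ha
            injection ha with ha; subst ha
            exact Or.inr hb
    · -- m ∈ rest ∨ new acc = some m
      by_cases hxm : x = m
      · subst hxm
        exact Or.inr (hstep_m H1)
      · rcases H2 with hmem | hacc
        · rcases List.mem_cons.mp hmem with rfl | hmem
          · exact absurd rfl hxm
          · exact Or.inl hmem
        · subst hacc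
          rcases H3 x (List.mem_cons_self) with rfl | hx
          · exact absurd rfl hxm
          · exact Or.inr (pvStep_of_not (pvLexlt_asymm hx))
    · intro y hy
      exact H3 y (List.mem_cons_of_mem _ hy)

-- B returns the strict lexicographic maximum
lemma alt_eq_of_dom (aset : List String) (m : String) (hm : m ∈ aset)
    (hdom : ∀ y ∈ aset, y = m ∨ pvLexlt y m) :
    anthropic_frontier_vendor_py_alt aset = some m := by
  have hne : aset.isEmpty = false := by
    cases aset with
    | nil => exact absurd hm (List.not_mem_nil)
    | cons a r => rfl
  rw [anthropic_frontier_vendor_py_alt, hne]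
  simp only [Bool.false_eq_true, if_false]
  rw [max2?_eq_foldl_pvStep]
  exact pvFold_eq m aset none (by intro a h; cases h) (Or.inl hm) hdom

-- evaluation of pvWeight on and off the four priority ids
lemma pvWeight_P1 : pvWeight "claude-opus-4-20250514" = 7 := by decide

lemma pvWeight_P2 : pvWeight "claude-3-opus-20240229" = 6 := by decide

lemma pvWeight_P3 : pvWeight "claude-sonnet-4-20250514" = 5 := by decide

lemma pvWeight_P4 : pvWeight "claude-3-5-sonnet-20241022" = 4 := by decide

lemma pvWeight_notmem {y : String} (h : y ∉ pvPriority) :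
    pvWeight y = if pvOpusSonnet y then 2 else 1 := by
  have hidx : PySem.List.index? pvPriority y = none := (PySem.List.index?_eq_none_iff _ _).mpr h
  unfold pvWeight
  rw [hidx]

lemma afv_scan_cons (v : String) (r : List String) :
    afv_scan (v :: r) = if pvOpusSonnet v then some v else afv_scan r := rfl

lemma afv_scan_none {l : List String} (h : afv_scan l = none) : ∀ y ∈ l, pvOpusSonnet y = false := by
  induction l with
  | nil => intro y hy; exact absurd hy (List.not_mem_nil)
  | cons x rest ih =>
    rw [afv_scan_cons] at h
    by_cases hx : pvOpusSonnet x
    · simp [hx] at h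
    · intro y hy
      rcases List.mem_cons.mp hy with rfl | hy
      · exact Bool.eq_false_iff.mpr hx
      · exact ih (by simpa [hx] using h) y hy

lemma afv_scan_some {l : List String} (hp : l.Pairwise (fun a b => b ≤ a)) {v : String}
    (h : afv_scan l = some v) :
    v ∈ l ∧ pvOpusSonnet v = true ∧ ∀ y ∈ l, pvOpusSonnet y = true → y ≤ v := by
  induction l with
  | nil => exact absurd h (by simp [afv_scan])
  | cons x rest ih =>
    rw [afv_scan_cons] at h
    rcases List.pairwise_cons.mp hp with ⟨hx_ge, hp'⟩
    by_cases hx : pvOpusSonnet x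
    · rw [if_pos hx] at h
      injection h with h; subst h
      refine ⟨List.mem_cons_self, hx, ?_⟩
      intro y hy _
      rcases List.mem_cons.mp hy with rfl | hy
      · exact le_refl _
      · exact hx_ge y hy
    · rw [if_neg hx] at h
      obtain ⟨hv_mem, hv_pred, hv_max⟩ := ih hp' h
      refine ⟨List.mem_cons_of_mem _ hv_mem, hv_pred, ?_⟩
      intro y hy hyp
      rcases List.mem_cons.mp hy with rfl | hy
      · exact absurd hyp (Bool.eq_false_iff.mp (Bool.eq_false_iff.mpr hx) ∘ id)
      · exact hv_max y hy hyp

lemma pyGet_neg_one {l : List String} (h : l ≠ []) :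
    PySem.List.pyGet? l (-1) = l.getLast? := by
  have hlen : 1 ≤ l.length := List.length_pos_iff.mpr h
  simp only [PySem.List.pyGet?, PySem.List.pyIdx?]
  have h0 : ¬ (0 : Int) ≤ -1 := by norm_num
  have h1 : -(l.length : Int) ≤ -1 := by
    have : (1 : Int) ≤ (l.length : Int) := by exact_mod_cast hlen
    omega
  rw [if_neg h0, if_pos h1]
  simp [List.getLast?_eq_getElem?]

lemma le_getLast_of_pairwise {l : List String} (hp : l.Pairwise (fun a b => a ≤ b))
    {m : String} (hm : l.getLast? = some m) : ∀ y ∈ l, y ≤ m := by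
  induction l with
  | nil => intro y hy; exact absurd hy (List.not_mem_nil)
  | cons x rest ih =>
    rcases List.pairwise_cons.mp hp with ⟨hx_le, hp'⟩
    cases rest with
    | nil =>
      intro y hy
      rcases List.mem_cons.mp hy with rfl | hy
      · simp at hm; subst hm; exact le_refl _
      · exact absurd hy (List.not_mem_nil)
    | cons z zs =>
      rw [List.getLast?_cons_cons] at hm
      intro y hy
      rcases List.mem_cons.mp hy with rfl | hy
      · calc y ≤ z := hx_le z List.mem_cons_self
          _ ≤ m := ih hp' hm z List.mem_cons_self
      · exact ih hp' hm y hy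

lemma notmem_priority {aset : List String} {y : String} (hy : y ∈ aset)
    (h1 : "claude-opus-4-20250514" ∉ aset) (h2 : "claude-3-opus-20240229" ∉ aset)
    (h3 : "claude-sonnet-4-20250514" ∉ aset) (h4 : "claude-3-5-sonnet-20241022" ∉ aset) :
    y ∉ pvPriority := by
  intro hmem
  simp only [pvPriority, List.mem_cons, List.not_mem_nil, or_false] at hmem
  rcases hmem with rfl | rfl | rfl | rfl
  exacts [h1 hy, h2 hy, h3 hy, h4 hy]

-- ===== VERDICT (by name: the statement is the Claim_ definition above) =====
theorem anthropic_frontier_vendor_py_spec : Claim_equal_anthropic_frontier_vendor_py := by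
  intro aset _
  unfold Spec_anthropic_frontier_vendor_py
  by_cases hE : aset = []
  · subst hE; decide
  by_cases h1 : "claude-opus-4-20250514" ∈ aset
  · have hA : anthropic_frontier_vendor_py aset = some "claude-opus-4-20250514" := by
      simp [anthropic_frontier_vendor_py, pick_first_vendor, pvPriority, h1]
    rw [hA, alt_eq_of_dom aset _ h1]
    intro y hy
    by_cases e1 : y = "claude-opus-4-20250514"
    · exact Or.inl e1
    right; left
    rw [pvWeight_P1]
    by_cases e2 : y = "claude-3-opus-20240229"
    · subst e2; rw [pvWeight_P2]; norm_num
    by_cases e3 : y = "claude-sonnet-4-20250514"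
    · subst e3; rw [pvWeight_P3]; norm_num
    by_cases e4 : y = "claude-3-5-sonnet-20241022"
    · subst e4; rw [pvWeight_P4]; norm_num
    have hnm : y ∉ pvPriority := by
      simp only [pvPriority, List.mem_cons, List.not_mem_nil, or_false]
      rintro (rfl | rfl | rfl | rfl) <;> simp_all
    rw [pvWeight_notmem hnm]
    split_ifs <;> norm_num
  by_cases h2 : "claude-3-opus-20240229" ∈ aset
  · have hA : anthropic_frontier_vendor_py aset = some "claude-3-opus-20240229" := by
      simp [anthropic_frontier_vendor_py, pick_first_vendor, pvPriority, h1, h2]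
    rw [hA, alt_eq_of_dom aset _ h2]
    intro y hy
    by_cases e2 : y = "claude-3-opus-20240229"
    · exact Or.inl e2
    right; left
    rw [pvWeight_P2]
    by_cases e1 : y = "claude-opus-4-20250514"
    · subst e1; exact absurd hy h1
    by_cases e3 : y = "claude-sonnet-4-20250514"
    · subst e3; rw [pvWeight_P3]; norm_num
    by_cases e4 : y = "claude-3-5-sonnet-20241022"
    · subst e4; rw [pvWeight_P4]; norm_num
    have hnm : y ∉ pvPriority := by
      simp only [pvPriority, List.mem_cons, List.not_mem_nil, or_false]
      rintro (rfl | rfl | rfl | rfl) <;> simp_all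
    rw [pvWeight_notmem hnm]
    split_ifs <;> norm_num
  by_cases h3 : "claude-sonnet-4-20250514" ∈ aset
  · have hA : anthropic_frontier_vendor_py aset = some "claude-sonnet-4-20250514" := by
      simp [anthropic_frontier_vendor_py, pick_first_vendor, pvPriority, h1, h2, h3]
    rw [hA, alt_eq_of_dom aset _ h3]
    intro y hy
    by_cases e3 : y = "claude-sonnet-4-20250514"
    · exact Or.inl e3
    right; left
    rw [pvWeight_P3]
    by_cases e1 : y = "claude-opus-4-20250514"
    · subst e1; exact absurd hy h1
    by_cases e2 : y = "claude-3-opus-20240229"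
    · subst e2; exact absurd hy h2
    by_cases e4 : y = "claude-3-5-sonnet-20241022"
    · subst e4; rw [pvWeight_P4]; norm_num
    have hnm : y ∉ pvPriority := by
      simp only [pvPriority, List.mem_cons, List.not_mem_nil, or_false]
      rintro (rfl | rfl | rfl | rfl) <;> simp_all
    rw [pvWeight_notmem hnm]
    split_ifs <;> norm_num
  by_cases h4 : "claude-3-5-sonnet-20241022" ∈ aset
  · have hA : anthropic_frontier_vendor_py aset = some "claude-3-5-sonnet-20241022" := by
      simp [anthropic_frontier_vendor_py, pick_first_vendor, pvPriority, h1, h2, h3, h4]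
    rw [hA, alt_eq_of_dom aset _ h4]
    intro y hy
    by_cases e4 : y = "claude-3-5-sonnet-20241022"
    · exact Or.inl e4
    right; left
    rw [pvWeight_P4]
    by_cases e1 : y = "claude-opus-4-20250514"
    · subst e1; exact absurd hy h1
    by_cases e2 : y = "claude-3-opus-20240229"
    · subst e2; exact absurd hy h2
    by_cases e3 : y = "claude-sonnet-4-20250514"
    · subst e3; exact absurd hy h3
    have hnm : y ∉ pvPriority := by
      simp only [pvPriority, List.mem_cons, List.not_mem_nil, or_false]
      rintro (rfl | rfl | rfl | rfl) <;> simp_all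
    rw [pvWeight_notmem hnm]
    split_ifs <;> norm_num
  -- fallback: none of the priority ids is present
  have hpick : pick_first_vendor pvPriority aset = none := by
    simp [pick_first_vendor, pvPriority, h1, h2, h3, h4]
  have hnm : ∀ y ∈ aset, y ∉ pvPriority := fun y hy => notmem_priority hy h1 h2 h3 h4
  cases hscan : afv_scan (PySem.List.sorted aset (fun x => x) true) with
  | some v =>
    have hA : anthropic_frontier_vendor_py aset = some v := by
      simp [anthropic_frontier_vendor_py, hpick, hscan]
    obtain ⟨hv_mem, hv_pred, hv_max⟩ :=
      afv_scan_some (PySem.List.sorted_pairwise_rev aset (fun x => x)) hscan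
    rw [PySem.List.mem_sorted] at hv_mem
    rw [hA, alt_eq_of_dom aset v hv_mem]
    intro y hy
    by_cases e : y = v
    · exact Or.inl e
    right
    unfold pvLexlt
    rw [pvWeight_notmem (hnm y hy), pvWeight_notmem (hnm v hv_mem), hv_pred]
    by_cases hp : pvOpusSonnet y
    · right
      rw [if_pos hp]
      refine ⟨rfl, lt_of_le_of_ne ?_ e⟩
      exact hv_max y ((PySem.List.mem_sorted _ _ _ _).mpr hy) hp
    · left
      rw [if_neg hp]
      norm_num
  | none =>
    have hpred0 : ∀ y ∈ aset, pvOpusSonnet y = false := by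
      intro y hy
      exact afv_scan_none hscan y ((PySem.List.mem_sorted _ _ _ _).mpr hy)
    have hEb : aset.isEmpty = false := by
      cases aset with
      | nil => exact absurd rfl hE
      | cons a r => rfl
    have hsne : PySem.List.sorted aset (fun x => x) false ≠ [] := by
      intro hnil
      exact hE ((PySem.List.sorted_eq_nil_iff aset (fun x => x) false).mp hnil)
    cases hlast : (PySem.List.sorted aset (fun x => x) false).getLast? with
    | none => exact absurd (List.getLast?_eq_none_iff.mp hlast) hsne
    | some M =>
      have hA : anthropic_frontier_vendor_py aset = some M := by
        rw [anthropic_frontier_vendor_py, hpick, hscan, hEb]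
        simp only [Bool.false_eq_true, if_false]
        rw [pyGet_neg_one hsne, hlast]
      have hM_mem : M ∈ aset := by
        rw [← PySem.List.mem_sorted aset (fun x => x) false]
        exact List.mem_of_getLast? hlast
      rw [hA, alt_eq_of_dom aset M hM_mem]
      intro y hy
      by_cases e : y = M
      · exact Or.inl e
      right
      unfold pvLexlt
      right
      rw [pvWeight_notmem (hnm y hy), pvWeight_notmem (hnm M hM_mem),
          hpred0 y hy, hpred0 M hM_mem]
      refine ⟨rfl, lt_of_le_of_ne ?_ e⟩
      exact le_getLast_of_pairwise (PySem.List.sorted_pairwise aset (fun x => x)) hlast y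
        ((PySem.List.mem_sorted _ _ _ _).mpr hy)
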